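-- pv_equiv track=rewrite | github.com/Planning-Inspectorate/ODW-Service | pipelines/scripts/archive_artifacts.py | get_unarchiveable_artifacts_to_delete
-- ===== SOURCE A (Python) =====
-- from typing import Set, Dict, Any
--
-- def get_unarchiveable_artifacts_to_delete(
--
--         artifacts_to_keep: Set[str],
--         unarchiveable_artifacts: Set[str],
--         dependency_map: Dict[str, Set[str]]
--     ) -> Set[str]:
--     """
--         Filter out the unarchiveable_artifacts that are not listed as dependencies of artifacts_to_keep
--     """
--     dependencies_of_artifacts_to_keep = {
--         artifact
--         for dependency, dependencies in dependency_map.items()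
--         for artifact in dependencies
--         if dependency in artifacts_to_keep
--     }
--     return unarchiveable_artifacts.difference(dependencies_of_artifacts_to_keep)
-- ===== SOURCE B (Python) =====
-- def get_unarchiveable_artifacts_to_delete(artifacts_to_keep, unarchiveable_artifacts, dependency_map):
--     # Keep each unarchiveable artifact unless some dependency-map entry of a kept
--     # artifact lists it: per-element existential scan, no intermediate dependency set.
--     return {
--         artifact
--         for artifact in unarchiveable_artifacts
--         if not any(dependency in artifacts_to_keep and artifact in dependencies
--                    for dependency, dependencies in dependency_map.items())
--     }
-- ===== Notes on version B (the rewrite author's own statement) =====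
-- stated objective: alternative
-- what changed: Instead of building the full set of dependencies of kept artifacts and taking a set difference, B filters the unarchiveable set directly, keeping each artifact unless an existential scan over the dependency map finds a kept artifact that lists it; Pre_ only requires unarchiveable_artifacts to be duplicate-free, which the Python set type guarantees by construction.
import Mathlib
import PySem

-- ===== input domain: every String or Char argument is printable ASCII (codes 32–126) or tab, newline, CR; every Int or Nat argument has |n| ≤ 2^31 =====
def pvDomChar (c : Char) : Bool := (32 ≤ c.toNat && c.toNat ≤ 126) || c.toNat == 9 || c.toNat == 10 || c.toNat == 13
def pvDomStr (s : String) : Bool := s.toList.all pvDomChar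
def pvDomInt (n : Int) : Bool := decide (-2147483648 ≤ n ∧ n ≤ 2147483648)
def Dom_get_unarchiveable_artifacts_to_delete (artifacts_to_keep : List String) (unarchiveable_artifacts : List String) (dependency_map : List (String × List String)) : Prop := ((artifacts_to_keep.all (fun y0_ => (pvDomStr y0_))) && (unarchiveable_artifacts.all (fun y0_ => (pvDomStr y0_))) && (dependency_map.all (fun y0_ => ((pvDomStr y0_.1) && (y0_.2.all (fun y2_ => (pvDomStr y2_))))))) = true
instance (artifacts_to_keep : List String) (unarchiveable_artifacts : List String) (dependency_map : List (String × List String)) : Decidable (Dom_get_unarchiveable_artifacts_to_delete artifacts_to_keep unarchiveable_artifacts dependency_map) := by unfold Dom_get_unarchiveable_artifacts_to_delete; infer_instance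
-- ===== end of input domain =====

-- ===== PORT A =====
-- A: build the set of all dependencies of kept artifacts (set comprehension over the
-- dependency map), then return unarchiveable_artifacts.difference(that set).
def get_unarchiveable_artifacts_to_delete (artifacts_to_keep : List String) (unarchiveable_artifacts : List String) (dependency_map : List (String × List String)) : List String :=
  let dependencies_of_artifacts_to_keep : PySem.Set String :=
    dependency_map.foldl
      (fun acc p =>
        if PySem.Set.contains artifacts_to_keep p.1 then
          p.2.foldl (fun s a => PySem.Set.add s a) acc
        else acc)
      PySem.Set.empty
  PySem.Set.diff unarchiveable_artifacts dependencies_of_artifacts_to_keep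

-- ===== PORT B =====
-- B: filter unarchiveable_artifacts directly, keeping an artifact unless some
-- dependency-map entry of a kept artifact lists it (per-element existential scan).
def get_unarchiveable_artifacts_to_delete_alt (artifacts_to_keep : List String) (unarchiveable_artifacts : List String) (dependency_map : List (String × List String)) : List String :=
  PySem.Set.ofList
    (unarchiveable_artifacts.filter
      (fun artifact =>
        ! dependency_map.any
          (fun p => PySem.Set.contains artifacts_to_keep p.1 && p.2.contains artifact)))

-- ===== PRECONDITION & SPEC =====
-- Pre_ only requires unarchiveable_artifacts to hold distinct elements, which the type
-- convention for Python sets guarantees (a Python set never has duplicates), so no input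
-- A accepts is excluded.
def Pre_get_unarchiveable_artifacts_to_delete (artifacts_to_keep : List String) (unarchiveable_artifacts : List String) (dependency_map : List (String × List String)) : Prop :=
  unarchiveable_artifacts.Nodup
instance (artifacts_to_keep : List String) (unarchiveable_artifacts : List String) (dependency_map : List (String × List String)) : Decidable (Pre_get_unarchiveable_artifacts_to_delete artifacts_to_keep unarchiveable_artifacts dependency_map) := by unfold Pre_get_unarchiveable_artifacts_to_delete; infer_instance
def pvWitness_get_unarchiveable_artifacts_to_delete : List String × List String × (List (String × List String)) :=
  (["a"], ["b", "c"], [("a", ["b"])])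
def Spec_get_unarchiveable_artifacts_to_delete (artifacts_to_keep : List String) (unarchiveable_artifacts : List String) (dependency_map : List (String × List String)) (out : List String) : Prop := out = get_unarchiveable_artifacts_to_delete_alt artifacts_to_keep unarchiveable_artifacts dependency_map
instance (artifacts_to_keep : List String) (unarchiveable_artifacts : List String) (dependency_map : List (String × List String)) (out : List String) : Decidable (Spec_get_unarchiveable_artifacts_to_delete artifacts_to_keep unarchiveable_artifacts dependency_map out) := by unfold Spec_get_unarchiveable_artifacts_to_delete; infer_instance

-- ===== CLAIM (what is proved, stated in full; the proofs are below) =====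
def Claim_equal_get_unarchiveable_artifacts_to_delete : Prop := ∀ (artifacts_to_keep : List String) (unarchiveable_artifacts : List String) (dependency_map : List (String × List String)), Dom_get_unarchiveable_artifacts_to_delete artifacts_to_keep unarchiveable_artifacts dependency_map → Pre_get_unarchiveable_artifacts_to_delete artifacts_to_keep unarchiveable_artifacts dependency_map → Spec_get_unarchiveable_artifacts_to_delete artifacts_to_keep unarchiveable_artifacts dependency_map (get_unarchiveable_artifacts_to_delete artifacts_to_keep unarchiveable_artifacts dependency_map)

-- ===== LEMMAS AND PROOFS =====

-- membership in A's accumulated dependency set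
theorem mem_deps_fold (artifacts_to_keep : List String) (dependency_map : List (String × List String)) (acc : List String) (a : String) :
    a ∈ dependency_map.foldl
      (fun acc p =>
        if PySem.Set.contains artifacts_to_keep p.1 then
          p.2.foldl (fun s a => PySem.Set.add s a) acc
        else acc) acc
    ↔ a ∈ acc ∨ ∃ p ∈ dependency_map, PySem.Set.contains artifacts_to_keep p.1 ∧ a ∈ p.2 := by
  induction dependency_map generalizing acc with
  | nil => simp
  | cons p ps ih =>
    simp only [List.foldl_cons, ih]
    by_cases h : PySem.Set.contains artifacts_to_keep p.1 = true
    · simp only [h, if_true]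
      have : a ∈ p.2.foldl (fun s a => PySem.Set.add s a) acc ↔ a ∈ acc ∨ ∃ b ∈ p.2, a = b := by
        simpa using PySem.Set.mem_foldl_add (f := fun b => b) (l := p.2) (s := acc) (y := a)
      rw [this]
      constructor
      · rintro ((h1 | ⟨b, hb, rfl⟩) | h2)
        · exact Or.inl h1
        · exact Or.inr ⟨p, by simp, h, hb⟩
        · rcases h2 with ⟨q, hq, hq1, hq2⟩; exact Or.inr ⟨q, by simp [hq], hq1, hq2⟩
      · rintro (h1 | ⟨q, hq, hq1, hq2⟩)
        · exact Or.inl (Or.inl h1)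
        · rcases List.mem_cons.mp hq with rfl | hq'
          · exact Or.inl (Or.inr ⟨a, hq2, rfl⟩)
          · exact Or.inr ⟨q, hq', hq1, hq2⟩
    · simp only [h]
      constructor
      · rintro (h1 | ⟨q, hq, hq1, hq2⟩)
        · exact Or.inl h1
        · exact Or.inr ⟨q, by simp [hq], hq1, hq2⟩
      · rintro (h1 | ⟨q, hq, hq1, hq2⟩)
        · exact Or.inl h1
        · rcases List.mem_cons.mp hq with rfl | hq'
          · exact absurd hq1 h
          · exact Or.inr ⟨q, hq', hq1, hq2⟩

-- ===== VERDICT (by name: the statement is the Claim_ definition above) =====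
theorem get_unarchiveable_artifacts_to_delete_spec : Claim_equal_get_unarchiveable_artifacts_to_delete := by
  intro keep unarch dmap _hdom hpre
  unfold Spec_get_unarchiveable_artifacts_to_delete
  unfold get_unarchiveable_artifacts_to_delete get_unarchiveable_artifacts_to_delete_alt
  rw [PySem.Set.ofList_eq_self_of_nodup _ (hpre.filter _)]
  rw [show ∀ (s t : List String), PySem.Set.diff s t = s.filter (fun x => ! PySem.Set.contains t x) from fun _ _ => rfl]
  apply List.filter_congr
  intro a _ha
  refine congrArg (!·) ?_
  rw [Bool.eq_iff_iff, PySem.Set.contains_iff, mem_deps_fold]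
  simp only [PySem.Set.empty, List.not_mem_nil, false_or, List.any_eq_true,
    Bool.and_eq_true, PySem.Set.contains_iff, List.contains_iff_mem]
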